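-- pv_equiv track=rewrite | github.com/spenszor/advent-of-code-2019 | day20.py | build_graph2
-- ===== SOURCE A (Python) =====
-- def neighs(p):
--     return [(p[0]+1, p[1]), (p[0], p[1]-1), (p[0]-1, p[1]), (p[0], p[1]+1)]
--
-- def build_graph2(floor, gates, inp):
--     h, w = len(inp), len(inp[0])
--     graph = {}
--     for n in floor:
--         neigh = []
--         for x in neighs(n):
--             if x in floor:
--                 neigh.append((x, 0))
--         for g in gates.values():
--             if len(g) == 2 and n in g:
--                 if n[0] in [2, h-3] or n[1] in [2, w-3]:
--                     neigh.append((g[(g.index(n)+1) % 2], -1))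
--                 else:
--                     neigh.append((g[(g.index(n)+1) % 2], 1))
--         graph[n] = neigh
--     return graph
-- ===== SOURCE B (Python) =====
-- def neighs(p):
--     return [(p[0]+1, p[1]), (p[0], p[1]-1), (p[0]-1, p[1]), (p[0], p[1]+1)]
--
-- def build_graph2(floor, gates, inp):
--     h, w = len(inp), len(inp[0])
--     graph = {n: [(x, 0) for x in neighs(n) if x in floor] for n in floor}
--     for g in gates.values():
--         if len(g) == 2:
--             a, b = g
--             # one portal edge per distinct endpoint of the gate
--             for e, other in ((a, b), (b, a)) if a != b else ((a, b),):
--                 if e in graph: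
--                     d = -1 if e[0] in (2, h - 3) or e[1] in (2, w - 3) else 1
--                     graph[e].append((other, d))
--     return graph
-- ===== Notes on version B (the rewrite author's own statement) =====
-- stated objective: faster
-- what changed: B builds the plain adjacency lists in one comprehension pass over floor and then adds portal edges gate-by-gate in a second loop over gates.values() (one edge per distinct endpoint), instead of A's rescan of every gate (with list.index) inside the per-node loop.
import Mathlib
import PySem

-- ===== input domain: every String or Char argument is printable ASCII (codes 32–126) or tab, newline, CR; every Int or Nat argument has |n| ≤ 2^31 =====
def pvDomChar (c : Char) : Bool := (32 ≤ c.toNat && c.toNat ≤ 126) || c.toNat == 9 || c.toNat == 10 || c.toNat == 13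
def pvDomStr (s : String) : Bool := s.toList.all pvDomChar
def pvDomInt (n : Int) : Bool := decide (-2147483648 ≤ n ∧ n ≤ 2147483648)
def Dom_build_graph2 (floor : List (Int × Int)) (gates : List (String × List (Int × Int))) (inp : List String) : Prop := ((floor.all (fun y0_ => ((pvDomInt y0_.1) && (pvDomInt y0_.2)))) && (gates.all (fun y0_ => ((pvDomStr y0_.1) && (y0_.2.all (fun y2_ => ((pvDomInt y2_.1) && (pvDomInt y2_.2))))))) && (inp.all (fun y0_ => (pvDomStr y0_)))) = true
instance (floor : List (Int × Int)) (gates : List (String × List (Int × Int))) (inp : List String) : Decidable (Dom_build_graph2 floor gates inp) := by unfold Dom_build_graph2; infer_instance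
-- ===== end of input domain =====

-- B builds the plain adjacency lists in one pass over floor and then adds the portal
-- edges gate-by-gate in a second loop over gates.values() (one edge per distinct
-- endpoint), instead of A's rescan of every gate (with list.index) inside the
-- per-node loop (objective: faster). Equivalence is about the RETURN value (a dict).

-- ===== PORT A =====
-- helper 'neighs' of the Python module
def pvNeighs (p : Int × Int) : List (Int × Int) :=
  [(p.1 + 1, p.2), (p.1, p.2 - 1), (p.1 - 1, p.2), (p.1, p.2 + 1)]

-- A's per-node gate step: 'if len(g) == 2 and n in g: … neigh.append((g[(g.index(n)+1)%2], ±1))'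
def pvGateStepA (h w : Int) (n : Int × Int) (neigh : List ((Int × Int) × Int)) (g : List (Int × Int)) : List ((Int × Int) × Int) :=
  if g.length == 2 && g.contains n then
    let other := PySem.List.pyGetD g (PySem.Int.mod (((PySem.List.index? g n).getD 0 : Int) + 1) 2) n
    if n.1 == 2 || n.1 == h - 3 || (n.2 == 2 || n.2 == w - 3) then
      neigh ++ [(other, (-1 : Int))]
    else
      neigh ++ [(other, (1 : Int))]
  else neigh

def build_graph2 (floor : List (Int × Int)) (gates : List (String × List (Int × Int))) (inp : List String) : List (Int × Int × List ((Int × Int) × Int)) :=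
  let h : Int := inp.length
  let w : Int := PySem.Str.len (PySem.List.pyGetD inp 0 "")
  let graph : PySem.Dict (Int × Int) (List ((Int × Int) × Int)) :=
    floor.foldl (fun graph n =>
      let neigh : List ((Int × Int) × Int) :=
        (pvNeighs n).foldl (fun neigh x => if floor.contains x then neigh ++ [(x, (0 : Int))] else neigh) []
      let neigh :=
        ((PySem.Dict.ofList gates).values).foldl (pvGateStepA h w n) neigh
      graph.insert n neigh) PySem.Dict.empty
  graph.items.map (fun p => (p.1.1, p.1.2, p.2))

-- ===== PORT B =====
-- B's loop body: 'if e in graph: graph[e].append((other, dir))' for one pair (e, other)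
def pvPortalStep (h w : Int) (graph : PySem.Dict (Int × Int) (List ((Int × Int) × Int))) (eo : (Int × Int) × (Int × Int)) : PySem.Dict (Int × Int) (List ((Int × Int) × Int)) :=
  if graph.contains eo.1 then
    let dir : Int := if eo.1.1 == 2 || eo.1.1 == h - 3 || (eo.1.2 == 2 || eo.1.2 == w - 3) then -1 else 1
    graph.modify eo.1 [] (fun l => l ++ [(eo.2, dir)])
  else graph

-- B's per-gate step: 'a, b = g; for e, other in ((a,b),(b,a)) if a != b else ((a,b),): …'
def pvGateStepB (h w : Int) (graph : PySem.Dict (Int × Int) (List ((Int × Int) × Int))) (g : List (Int × Int)) : PySem.Dict (Int × Int) (List ((Int × Int) × Int)) :=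
  match g with
  | [a, b] => (if a != b then [(a, b), (b, a)] else [(a, b)]).foldl (pvPortalStep h w) graph
  | _ => graph

def build_graph2_alt (floor : List (Int × Int)) (gates : List (String × List (Int × Int))) (inp : List String) : List (Int × Int × List ((Int × Int) × Int)) :=
  let h : Int := inp.length
  let w : Int := PySem.Str.len (PySem.List.pyGetD inp 0 "")
  let graph : PySem.Dict (Int × Int) (List ((Int × Int) × Int)) :=
    floor.foldl (fun graph n =>
      graph.insert n (((pvNeighs n).filter (fun x => floor.contains x)).map (fun x => (x, (0 : Int))))) PySem.Dict.empty
  let graph := ((PySem.Dict.ofList gates).values).foldl (pvGateStepB h w) graph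
  graph.items.map (fun p => (p.1.1, p.1.2, p.2))

-- ===== PRECONDITION & SPEC =====
-- Pre_ excludes only empty inp, on which A (and B) raise IndexError at inp[0].
def Pre_build_graph2 (floor : List (Int × Int)) (gates : List (String × List (Int × Int))) (inp : List String) : Prop :=
  inp ≠ []
instance (floor : List (Int × Int)) (gates : List (String × List (Int × Int))) (inp : List String) : Decidable (Pre_build_graph2 floor gates inp) := by unfold Pre_build_graph2; infer_instance

def pvWitness_build_graph2 : (List (Int × Int)) × (List (String × List (Int × Int))) × List String :=
  ([(2, 2), (3, 2)], [("AB", [(2, 2), (3, 2)])], ["abc", "abc", "abc"])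

def Spec_build_graph2 (floor : List (Int × Int)) (gates : List (String × List (Int × Int))) (inp : List String) (out : List (Int × Int × List ((Int × Int) × Int))) : Prop := out = build_graph2_alt floor gates inp
instance (floor : List (Int × Int)) (gates : List (String × List (Int × Int))) (inp : List String) (out : List (Int × Int × List ((Int × Int) × Int))) : Decidable (Spec_build_graph2 floor gates inp out) := by unfold Spec_build_graph2; infer_instance

-- ===== CLAIM (what is proved, stated in full; the proofs are below) =====
def Claim_equal_build_graph2 : Prop := ∀ (floor : List (Int × Int)) (gates : List (String × List (Int × Int))) (inp : List String), Dom_build_graph2 floor gates inp → Pre_build_graph2 floor gates inp → Spec_build_graph2 floor gates inp (build_graph2 floor gates inp)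

-- ===== LEMMAS AND PROOFS =====

-- the edge list one gate g contributes to node n (read off A's branches verbatim)
def pvGedges (h w : Int) (n : Int × Int) (g : List (Int × Int)) : List ((Int × Int) × Int) :=
  if g.length == 2 && g.contains n then
    let other := PySem.List.pyGetD g (PySem.Int.mod (((PySem.List.index? g n).getD 0 : Int) + 1) 2) n
    if n.1 == 2 || n.1 == h - 3 || (n.2 == 2 || n.2 == w - 3) then
      [(other, (-1 : Int))]
    else
      [(other, (1 : Int))]
  else []

theorem pvGateStepA_eq_append (h w : Int) (n : Int × Int) (neigh : List ((Int × Int) × Int)) (g : List (Int × Int)) :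
    pvGateStepA h w n neigh g = neigh ++ pvGedges h w n g := by
  unfold pvGateStepA pvGedges
  split_ifs <;> simp

theorem pv_foldl_insert_getD {κ ν : Type} [BEq κ] [LawfulBEq κ] [DecidableEq κ]
    (l : List κ) (F : κ → ν) (d : PySem.Dict κ ν) (k : κ) (dflt : ν) :
    (l.foldl (fun d n => d.insert n (F n)) d).getD k dflt
      = if k ∈ l then F k else d.getD k dflt := by
  induction l generalizing d with
  | nil => simp
  | cons x l ih =>
    simp only [List.foldl_cons, ih, List.mem_cons]
    by_cases hk : k ∈ l
    · simp [hk]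
    · simp only [hk, or_false]
      by_cases hx : k = x
      · simp [hx, PySem.Dict.getD_insert_self]
      · simp [hx, PySem.Dict.getD_insert_of_ne _ _ _ hx]

theorem pv_contains_modify_of_contains {κ ν : Type} [BEq κ] [LawfulBEq κ]
    (d : PySem.Dict κ ν) (a k : κ) (d0 : ν) (f : ν → ν) (ha : d.contains a = true) :
    (d.modify a d0 f).contains k = d.contains k := by
  rw [PySem.Dict.contains_modify]
  by_cases h : k = a
  · subst h; simp [ha]
  · simp [h]

theorem pv_keys_modify_of_contains {κ ν : Type} [BEq κ] [LawfulBEq κ]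
    (d : PySem.Dict κ ν) (a : κ) (d0 : ν) (f : ν → ν) (ha : d.contains a = true) :
    (d.modify a d0 f).keys = d.keys := by
  rw [PySem.Dict.keys_modify, PySem.Dict.keys_insert_of_contains _ _ ha]

theorem pvPortalStep_contains (h w : Int) (d : PySem.Dict (Int × Int) (List ((Int × Int) × Int)))
    (eo : (Int × Int) × (Int × Int)) (k : Int × Int) :
    (pvPortalStep h w d eo).contains k = d.contains k := by
  unfold pvPortalStep
  by_cases h1 : d.contains eo.1 = true
  · rw [if_pos h1]
    exact pv_contains_modify_of_contains d eo.1 k [] _ h1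
  · rw [if_neg h1]

theorem pvPortalStep_keys (h w : Int) (d : PySem.Dict (Int × Int) (List ((Int × Int) × Int)))
    (eo : (Int × Int) × (Int × Int)) :
    (pvPortalStep h w d eo).keys = d.keys := by
  unfold pvPortalStep
  by_cases h1 : d.contains eo.1 = true
  · rw [if_pos h1]
    exact pv_keys_modify_of_contains d eo.1 [] _ h1
  · rw [if_neg h1]

theorem pvPortalStep_getD_self (h w : Int) (d : PySem.Dict (Int × Int) (List ((Int × Int) × Int)))
    (n o : Int × Int) (hn : d.contains n = true) :
    (pvPortalStep h w d (n, o)).getD n []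
      = d.getD n [] ++ [(o, if n.1 == 2 || n.1 == h - 3 || (n.2 == 2 || n.2 == w - 3) then (-1 : Int) else 1)] := by
  unfold pvPortalStep
  rw [if_pos hn, PySem.Dict.getD_modify, if_pos rfl]

theorem pvPortalStep_getD_ne (h w : Int) (d : PySem.Dict (Int × Int) (List ((Int × Int) × Int)))
    (n : Int × Int) (eo : (Int × Int) × (Int × Int)) (hne : n ≠ eo.1) :
    (pvPortalStep h w d eo).getD n [] = d.getD n [] := by
  unfold pvPortalStep
  by_cases h1 : d.contains eo.1 = true
  · rw [if_pos h1, PySem.Dict.getD_modify, if_neg hne]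
  · rw [if_neg h1]

theorem pvGateStepB_contains (h w : Int) (d : PySem.Dict (Int × Int) (List ((Int × Int) × Int)))
    (g : List (Int × Int)) (k : Int × Int) :
    (pvGateStepB h w d g).contains k = d.contains k := by
  unfold pvGateStepB
  match g with
  | [] => rfl
  | [_] => rfl
  | _ :: _ :: _ :: _ => rfl
  | [a, b] =>
    by_cases hab : a = b
    · subst hab
      simp only [bne_self_eq_false, Bool.false_eq_true, if_false, List.foldl_cons, List.foldl_nil]
      rw [pvPortalStep_contains]
    · have : (a != b) = true := bne_iff_ne.mpr hab
      simp only [this, if_true, List.foldl_cons, List.foldl_nil]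
      rw [pvPortalStep_contains, pvPortalStep_contains]

theorem pvGateStepB_keys (h w : Int) (d : PySem.Dict (Int × Int) (List ((Int × Int) × Int)))
    (g : List (Int × Int)) :
    (pvGateStepB h w d g).keys = d.keys := by
  unfold pvGateStepB
  match g with
  | [] => rfl
  | [_] => rfl
  | _ :: _ :: _ :: _ => rfl
  | [a, b] =>
    by_cases hab : a = b
    · subst hab
      simp only [bne_self_eq_false, Bool.false_eq_true, if_false, List.foldl_cons, List.foldl_nil]
      rw [pvPortalStep_keys]
    · have : (a != b) = true := bne_iff_ne.mpr hab
      simp only [this, if_true, List.foldl_cons, List.foldl_nil]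
      rw [pvPortalStep_keys, pvPortalStep_keys]

-- one gate step of B adds exactly A's per-gate edge list to a contained node's entry
theorem pvGateStepB_getD (h w : Int) (d : PySem.Dict (Int × Int) (List ((Int × Int) × Int)))
    (g : List (Int × Int)) (n : Int × Int) (hn : d.contains n = true) :
    (pvGateStepB h w d g).getD n [] = d.getD n [] ++ pvGedges h w n g := by
  unfold pvGateStepB
  match g with
  | [] => simp [pvGedges]
  | [x] => simp [pvGedges]
  | x :: y :: z :: t => simp [pvGedges]
  | [a, b] =>
    have hedge : ∀ m o : Int × Int, pvGedges h w m [m, o] = [(o, if m.1 == 2 || m.1 == h - 3 || (m.2 == 2 || m.2 == w - 3) then (-1 : Int) else 1)] := by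
      intro m o
      unfold pvGedges
      rw [PySem.List.index?_cons_self]
      simp only [List.length_cons, List.length_nil, List.contains_cons, BEq.rfl, Bool.true_or,
        Bool.and_true, Option.getD_some]
      norm_num [PySem.Int.mod]
      split_ifs <;> simp [PySem.List.pyGetD]
    have hedge2 : a ≠ b → pvGedges h w b [a, b] = [(a, if b.1 == 2 || b.1 == h - 3 || (b.2 == 2 || b.2 == w - 3) then (-1 : Int) else 1)] := by
      intro hab'
      unfold pvGedges
      rw [PySem.List.index?_cons_of_ne _ hab', PySem.List.index?_cons_self]
      have hc : List.contains [a, b] b = true := by simp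
      simp only [List.length_cons, List.length_nil, hc, Bool.and_true, Option.map_some,
        Option.getD_some]
      norm_num [PySem.Int.mod]
      split_ifs <;> simp
    have hnone : ∀ m : Int × Int, m ≠ a → m ≠ b → pvGedges h w m [a, b] = [] := by
      intro m h1 h2
      unfold pvGedges
      have hc : List.contains [a, b] m = false := by simp [h1, h2]
      rw [hc]
      simp
    by_cases hab : a = b
    · subst hab
      simp only [bne_self_eq_false, Bool.false_eq_true, if_false, List.foldl_cons, List.foldl_nil]
      by_cases hna : n = a
      · subst hna
        rw [pvPortalStep_getD_self h w d n n hn, hedge n n]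
      · rw [pvPortalStep_getD_ne h w d n (a, a) hna, hnone n hna hna, List.append_nil]
    · have hab' : (a != b) = true := bne_iff_ne.mpr hab
      simp only [hab', if_true, List.foldl_cons, List.foldl_nil]
      by_cases hna : n = a
      · subst hna
        rw [pvPortalStep_getD_ne _ _ _ n (b, n) hab, pvPortalStep_getD_self h w d n b hn, hedge n b]
      · by_cases hnb : n = b
        · subst hnb
          rw [pvPortalStep_getD_self _ _ _ n a
              (by rw [pvPortalStep_contains]; exact hn),
            pvPortalStep_getD_ne h w d n (a, n) hna, hedge2 hab]
        · rw [pvPortalStep_getD_ne _ _ _ n (b, a) hnb,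
            pvPortalStep_getD_ne h w d n (a, b) hna, hnone n hna hnb, List.append_nil]

theorem pv_foldl_stepB_keys (h w : Int) (gs : List (List (Int × Int)))
    (d : PySem.Dict (Int × Int) (List ((Int × Int) × Int))) :
    (gs.foldl (pvGateStepB h w) d).keys = d.keys := by
  induction gs generalizing d with
  | nil => rfl
  | cons g gs ih => rw [List.foldl_cons, ih, pvGateStepB_keys]

theorem pv_foldl_stepB_getD (h w : Int) (gs : List (List (Int × Int)))
    (d : PySem.Dict (Int × Int) (List ((Int × Int) × Int))) (n : Int × Int)
    (hn : d.contains n = true) :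
    (gs.foldl (pvGateStepB h w) d).getD n [] = d.getD n [] ++ gs.flatMap (pvGedges h w n) := by
  induction gs generalizing d with
  | nil => simp
  | cons g gs ih =>
    rw [List.foldl_cons, List.flatMap_cons,
      ih _ (by rw [pvGateStepB_contains]; exact hn),
      pvGateStepB_getD h w d g n hn, List.append_assoc]

theorem pv_foldl_stepA (h w : Int) (n : Int × Int) (gs : List (List (Int × Int)))
    (init : List ((Int × Int) × Int)) :
    gs.foldl (pvGateStepA h w n) init = init ++ gs.flatMap (pvGedges h w n) := by
  have : pvGateStepA h w n = fun neigh g => neigh ++ pvGedges h w n g :=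
    funext fun neigh => funext fun g => pvGateStepA_eq_append h w n neigh g
  rw [this, PySem.List.foldl_append_eq_flatMap]

-- the whole pipeline, with the gate-value list abstracted
theorem pv_main (floor : List (Int × Int)) (gs : List (List (Int × Int))) (h w : Int) :
    (floor.foldl (fun graph n =>
        graph.insert n (gs.foldl (pvGateStepA h w n)
          ((pvNeighs n).foldl (fun neigh x => if floor.contains x then neigh ++ [(x, (0 : Int))] else neigh) [])))
      (PySem.Dict.empty : PySem.Dict (Int × Int) (List ((Int × Int) × Int)))).items
    = ((gs.foldl (pvGateStepB h w)
        (floor.foldl (fun graph n =>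
          graph.insert n (((pvNeighs n).filter (fun x => floor.contains x)).map (fun x => (x, (0 : Int)))))
          (PySem.Dict.empty : PySem.Dict (Int × Int) (List ((Int × Int) × Int)))))).items := by
  have hkeysA : (floor.foldl (fun graph n =>
        graph.insert n (gs.foldl (pvGateStepA h w n)
          ((pvNeighs n).foldl (fun neigh x => if floor.contains x then neigh ++ [(x, (0 : Int))] else neigh) [])))
      (PySem.Dict.empty : PySem.Dict (Int × Int) (List ((Int × Int) × Int)))).keys = PySem.Set.ofList floor := by
    rw [PySem.Dict.keys_foldl_insert, PySem.Dict.keys_empty, PySem.Set.update_nil_left]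
  have hkeys0 : (floor.foldl (fun graph n =>
        graph.insert n (((pvNeighs n).filter (fun x => floor.contains x)).map (fun x => (x, (0 : Int)))))
      (PySem.Dict.empty : PySem.Dict (Int × Int) (List ((Int × Int) × Int)))).keys = PySem.Set.ofList floor := by
    rw [PySem.Dict.keys_foldl_insert, PySem.Dict.keys_empty, PySem.Set.update_nil_left]
  have hkeysB : ((gs.foldl (pvGateStepB h w)
        (floor.foldl (fun graph n =>
          graph.insert n (((pvNeighs n).filter (fun x => floor.contains x)).map (fun x => (x, (0 : Int)))))
          (PySem.Dict.empty : PySem.Dict (Int × Int) (List ((Int × Int) × Int)))))).keys = PySem.Set.ofList floor := by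
    rw [pv_foldl_stepB_keys, hkeys0]
  have hnodup : (PySem.Set.ofList floor).Nodup := PySem.Set.nodup_ofList floor
  rw [PySem.Dict.items_eq_map_keys _ (by rw [hkeysA]; exact hnodup) [],
      PySem.Dict.items_eq_map_keys _ (by rw [hkeysB]; exact hnodup) [],
      hkeysA, hkeysB]
  apply List.map_congr_left
  intro k hk
  have hkf : k ∈ floor := (PySem.Set.mem_ofList _ _).mp hk
  have hadj : (pvNeighs k).foldl (fun neigh x => if floor.contains x then neigh ++ [(x, (0 : Int))] else neigh) []
      = ((pvNeighs k).filter (fun x => floor.contains x)).map (fun x => (x, (0 : Int))) := by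
    rw [PySem.List.foldl_append_if]
    simp only [List.nil_append]
  have hA : (floor.foldl (fun graph n =>
        graph.insert n (gs.foldl (pvGateStepA h w n)
          ((pvNeighs n).foldl (fun neigh x => if floor.contains x then neigh ++ [(x, (0 : Int))] else neigh) [])))
      (PySem.Dict.empty : PySem.Dict (Int × Int) (List ((Int × Int) × Int)))).getD k []
      = gs.foldl (pvGateStepA h w k)
          ((pvNeighs k).foldl (fun neigh x => if floor.contains x then neigh ++ [(x, (0 : Int))] else neigh) []) := by
    rw [pv_foldl_insert_getD floor
      (fun n => gs.foldl (pvGateStepA h w n)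
        ((pvNeighs n).foldl (fun neigh x => if floor.contains x then neigh ++ [(x, (0 : Int))] else neigh) []))]
    rw [if_pos hkf]
  have hcont0 : (floor.foldl (fun graph n =>
        graph.insert n (((pvNeighs n).filter (fun x => floor.contains x)).map (fun x => (x, (0 : Int)))))
      (PySem.Dict.empty : PySem.Dict (Int × Int) (List ((Int × Int) × Int)))).contains k = true := by
    rw [PySem.Dict.contains_iff_mem_keys, hkeys0]
    exact hk
  have hB : ((gs.foldl (pvGateStepB h w)
        (floor.foldl (fun graph n =>
          graph.insert n (((pvNeighs n).filter (fun x => floor.contains x)).map (fun x => (x, (0 : Int)))))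
          (PySem.Dict.empty : PySem.Dict (Int × Int) (List ((Int × Int) × Int)))))).getD k []
      = (((pvNeighs k).filter (fun x => floor.contains x)).map (fun x => (x, (0 : Int))))
          ++ gs.flatMap (pvGedges h w k) := by
    rw [pv_foldl_stepB_getD h w gs _ k hcont0,
      pv_foldl_insert_getD floor
        (fun n => ((pvNeighs n).filter (fun x => floor.contains x)).map (fun x => (x, (0 : Int)))),
      if_pos hkf]
  rw [hA, hB, pv_foldl_stepA, hadj]

-- ===== VERDICT (by name: the statement is the Claim_ definition above) =====
theorem build_graph2_spec : Claim_equal_build_graph2 := by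
  intro floor gates inp _ _
  unfold Spec_build_graph2 build_graph2 build_graph2_alt
  exact congrArg (List.map _) (pv_main floor _ _ _)
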